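-- pv_equiv track=rewrite | github.com/le314u/Academico | IFMG/Projeto Analise Algoritimo/EX3/tp3.py | numberDigitsRec
-- ===== SOURCE A (Python) =====
-- def numberDigitsRec(indice, base, somaAnt, nDigits):
--     """Calcula recursivamente quantos digitos são escritos
--     até começar a escrever um elemento com 'n'digitos"""
--     somaAnt=0
--     nDigits=1
--     while(True):
--         #Calcula quantos elementos existem com nDigits
--         qtdElementos = (base ** nDigits);
--         #Calcula quantos caracteres foram escritos até chegar em um elemento de 'n' digitos
--         initElement = somaAnt;
--         #Calcula quantos caracteres são escritos até escrever todos os elementos de 'n'digitos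
--         endElement = initElement + ( qtdElementos * nDigits);
--         #Verifica se o indice 'n' esa dentro de um elemento com 'n' caracteres
--         if(endElement >= indice):#Esta dentro
--             return (nDigits, initElement+1, endElement);
--         else:#Esta fora
--             #Verifico se o caracter procurado esta dentro de um elemento com 'nDigits+1'
--             somaAnt = endElement
--             nDigits = nDigits+1
-- ===== SOURCE B (Python) =====
-- def _totalChars(base, n):
--     """Closed form for the number of characters written through all elements
--     of up to n digits: sum_{k=1..n} k * base**k (exact integer division)."""
--     if base == 1:
--         return n * (n + 1) // 2
--     return base * (n * base ** (n + 1) - (n + 1) * base ** n + 1) // (base - 1) ** 2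
--
--
-- def numberDigitsRec(indice, base, somaAnt, nDigits):
--     """Find the least n whose cumulative character count reaches 'indice',
--     using a stateless closed-form prefix sum; the bracket start is
--     reconstructed as the previous prefix sum plus one."""
--     n = 1
--     while _totalChars(base, n) < indice:
--         n += 1
--     return (n, _totalChars(base, n - 1) + 1, _totalChars(base, n))
-- ===== Notes on version B (the rewrite author's own statement) =====
-- stated objective: alternative
-- what changed: B drops A's stateful accumulating loop (carrying somaAnt across iterations) and instead evaluates a stateless closed-form prefix sum S(n)=sum k*base^k, searching for the least n with S(n) >= indice and reconstructing the bracket start as S(n-1)+1.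
import Mathlib
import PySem

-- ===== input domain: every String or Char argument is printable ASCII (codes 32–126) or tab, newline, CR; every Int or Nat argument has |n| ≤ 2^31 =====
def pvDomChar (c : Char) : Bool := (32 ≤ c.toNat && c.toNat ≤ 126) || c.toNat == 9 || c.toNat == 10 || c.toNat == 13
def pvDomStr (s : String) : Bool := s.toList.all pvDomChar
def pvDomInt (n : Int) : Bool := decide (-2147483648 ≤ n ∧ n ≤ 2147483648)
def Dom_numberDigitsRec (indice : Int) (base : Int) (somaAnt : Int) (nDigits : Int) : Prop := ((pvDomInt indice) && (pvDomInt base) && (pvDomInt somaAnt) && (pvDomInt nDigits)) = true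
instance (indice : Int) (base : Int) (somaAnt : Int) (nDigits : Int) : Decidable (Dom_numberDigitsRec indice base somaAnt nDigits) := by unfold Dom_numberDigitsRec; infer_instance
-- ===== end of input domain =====

-- B replaces A's accumulating loop with a stateless closed-form prefix sum S(n) = Σ k·base^k,
-- searching for the least n with S(n) ≥ indice and recovering the start as S(n-1)+1;
-- same value as A everywhere A returns.

-- ===== PORT A =====
-- Fuel bound for both loops (a totality guard only: whenever the Python loops return at all —
-- i.e. unless base = 0 with indice > 0 — they return within this many iterations; the value
-- itself never reaches the output).
def pvFuel (indice base : Int) : Nat :=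
  if base ≤ -1 then 2 * (max indice 1).toNat + 2 else 2 * indice.toNat + 2

-- A's loop, step for step: recompute base ^ nDigits, endElement = somaAnt + it * nDigits,
-- test, else loop with somaAnt := endElement, nDigits + 1.  (A always starts it at nDigits = 1,
-- so the counter is kept as a Nat.)
def pvLoopA (indice base : Int) (fuel : Nat) (somaAnt : Int) (nDigits : Nat) : Int × Int × Int :=
  match fuel with
  | 0 => (0, 0, 0)  -- fuel exhausted: only reachable where Python A loops forever (base = 0, indice > 0)
  | fuel + 1 =>
    let qtdElementos := base ^ nDigits
    let initElement := somaAnt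
    let endElement := initElement + qtdElementos * (nDigits : Int)
    if indice ≤ endElement then ((nDigits : Int), initElement + 1, endElement)
    else pvLoopA indice base fuel endElement (nDigits + 1)

def numberDigitsRec (indice : Int) (base : Int) (somaAnt : Int) (nDigits : Int) : Int × Int × Int :=
  -- A overwrites somaAnt := 0 and nDigits := 1 before its loop
  pvLoopA indice base (pvFuel indice base) 0 1

-- ===== PORT B =====
-- _totalChars: closed-form prefix sum, with Python's // ported as PySem.Int.floordiv
def pvTotalChars (base : Int) (n : Nat) : Int :=
  if base = 1 then PySem.Int.floordiv ((n : Int) * ((n : Int) + 1)) 2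
  else PySem.Int.floordiv (base * ((n : Int) * base ^ (n + 1) - ((n : Int) + 1) * base ^ n + 1)) ((base - 1) ^ 2)

-- B's search loop: while _totalChars(base, n) < indice: n += 1 (fuel is a totality guard only;
-- none = fuel exhausted, only reachable where Python B loops forever: base = 0, indice > 0)
def pvLeast? (indice base : Int) (fuel : Nat) (n : Nat) : Option Nat :=
  match fuel with
  | 0 => none
  | fuel + 1 =>
    if pvTotalChars base n < indice then pvLeast? indice base fuel (n + 1) else some n

def numberDigitsRec_alt (indice : Int) (base : Int) (somaAnt : Int) (nDigits : Int) : Int × Int × Int :=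
  match pvLeast? indice base (pvFuel indice base) 1 with
  | none => (0, 0, 0)
  | some n => ((n : Int), pvTotalChars base (n - 1) + 1, pvTotalChars base n)

-- ===== PRECONDITION & SPEC =====
def Spec_numberDigitsRec (indice : Int) (base : Int) (somaAnt : Int) (nDigits : Int) (out : Int × Int × Int) : Prop := out = numberDigitsRec_alt indice base somaAnt nDigits
instance (indice : Int) (base : Int) (somaAnt : Int) (nDigits : Int) (out : Int × Int × Int) : Decidable (Spec_numberDigitsRec indice base somaAnt nDigits out) := by unfold Spec_numberDigitsRec; infer_instance

-- ===== CLAIM =====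
def Claim_equal_numberDigitsRec : Prop := ∀ (indice : Int) (base : Int) (somaAnt : Int) (nDigits : Int), Dom_numberDigitsRec indice base somaAnt nDigits → Spec_numberDigitsRec indice base somaAnt nDigits (numberDigitsRec indice base somaAnt nDigits)

-- ===== LEMMAS AND PROOFS =====

-- The recursive prefix sum Σ_{k=1..n} k·base^k that A's loop accumulates.
def pvT (base : Int) : Nat → Int
  | 0 => 0
  | n + 1 => pvT base n + base ^ (n + 1) * ((n : Int) + 1)

-- Exact division: both Python // divisors here are positive and divide their numerator.
lemma pvFloordivMulCancel (d q : Int) (hd : 0 < d) : PySem.Int.floordiv (d * q) d = q := by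
  rw [PySem.Int.floordiv_eq_ediv_of_pos hd]
  exact Int.mul_ediv_cancel_left q (by omega)

lemma pvTotalChars_eq_pvT (base : Int) : ∀ n, pvTotalChars base n = pvT base n := by
  intro n
  induction n with
  | zero =>
    unfold pvTotalChars pvT
    split <;> norm_num [PySem.Int.floordiv]
  | succ n ih =>
    unfold pvTotalChars at *
    unfold pvT
    rw [← ih]
    by_cases hb : base = 1
    · simp only [if_pos hb]
      obtain ⟨q, hq⟩ : Even ((n : Int) * ((n : Int) + 1)) := Int.even_mul_succ_self _
      have h1 : (n : Int) * ((n : Int) + 1) = 2 * q := by omega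
      have h2 : (((n : Nat) + 1 : Nat) : Int) * ((((n : Nat) + 1 : Nat) : Int) + 1)
          = 2 * (q + ((n : Int) + 1)) := by push_cast; nlinarith
      rw [h1, h2, pvFloordivMulCancel _ _ (by norm_num), pvFloordivMulCancel _ _ (by norm_num)]
      rw [hb]; ring
    · simp only [if_neg hb]
      have hb1 : base - 1 ≠ 0 := fun h => hb (by omega)
      have hd : (0 : Int) < (base - 1) ^ 2 := by positivity
      have key : ∀ m : Nat,
          base * ((m : Int) * base ^ (m + 1) - ((m : Int) + 1) * base ^ m + 1)
            = (base - 1) ^ 2 * pvT base m := by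
        intro m
        induction m with
        | zero => simp [pvT]
        | succ m ihm =>
          simp only [pvT]
          push_cast
          push_cast at ihm
          linear_combination ihm
      rw [key n, key (n + 1), pvFloordivMulCancel _ _ hd, pvFloordivMulCancel _ _ hd]
      simp [pvT]

-- Lockstep: A's loop, started at counter n+1 with the accumulated sum pvT base n,
-- returns exactly what B reconstructs from the least index found from n+1 with the same fuel.
lemma pvLoopA_eq_search (indice base : Int) :
    ∀ (fuel : Nat) (n : Nat),
      pvLoopA indice base fuel (pvT base n) (n + 1) =
      (match pvLeast? indice base fuel (n + 1) with
       | none => (0, 0, 0)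
       | some m => ((m : Int), pvTotalChars base (m - 1) + 1, pvTotalChars base m)) := by
  intro fuel
  induction fuel with
  | zero => intro n; rfl
  | succ fuel ih =>
    intro n
    rw [pvLoopA, pvLeast?]
    have hend : pvT base n + base ^ (n + 1) * ((n : Int) + 1) = pvT base (n + 1) := rfl
    have hS : pvTotalChars base (n + 1) = pvT base (n + 1) := pvTotalChars_eq_pvT base (n + 1)
    by_cases hlt : pvTotalChars base (n + 1) < indice
    · rw [if_pos hlt]
      rw [if_neg (by push_cast; rw [hS] at hlt; omega)]
      push_cast
      rw [hend]
      exact ih (n + 1)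
    · rw [if_neg hlt]
      rw [if_pos (by push_cast; rw [hS] at hlt; omega)]
      simp only [Nat.add_sub_cancel, pvTotalChars_eq_pvT]
      push_cast
      rw [hend]

-- ===== VERDICT =====
theorem numberDigitsRec_spec : Claim_equal_numberDigitsRec := by
  intro indice base somaAnt nDigits _
  unfold Spec_numberDigitsRec numberDigitsRec numberDigitsRec_alt
  have h := pvLoopA_eq_search indice base (pvFuel indice base) 0
  simpa [pvT] using h
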